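-- pv_equiv track=rewrite | github.com/paulnsorensen/ralphify | src/ralphify/_frontmatter.py | _extract_frontmatter_block
-- ===== SOURCE A (Python) =====
-- _FRONTMATTER_DELIMITER = "---"
--
-- def _extract_frontmatter_block(text: str) -> tuple[str, str]:
--     """Split text into raw YAML frontmatter and body at ``---`` delimiters.
--
--     The opening ``---`` must be the very first line (standard YAML
--     frontmatter convention).  Returns ``("", text)`` when no valid
--     frontmatter block is found.
--     """
--     lines = text.split("\n")
--     if lines[0].rstrip() != _FRONTMATTER_DELIMITER:
--         return "", text
--
--     for i, line in enumerate(lines[1:], start=1):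
--         if line.rstrip() == _FRONTMATTER_DELIMITER:
--             fm_raw = "\n".join(lines[1:i])
--             body = "\n".join(lines[i + 1 :]).strip()
--             return fm_raw, body
--     return "", text
-- ===== SOURCE B (Python) =====
-- _FRONTMATTER_DELIMITER = "---"
--
--
-- def _extract_frontmatter_block(text: str) -> tuple[str, str]:
--     """Split text into raw YAML frontmatter and body at ``---`` delimiters.
--
--     Single-pass state machine: walk the lines once with a three-state
--     automaton (expect-opening / inside-frontmatter / in-body), accumulating
--     frontmatter and body lines as they stream by; no index arithmetic or
--     slicing.  Only commits if the body state was reached.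
--     """
--     EXPECT_OPEN, IN_FM, IN_BODY = 0, 1, 2
--     state = EXPECT_OPEN
--     fm_lines: list[str] = []
--     body_lines: list[str] = []
--     for ln in text.split("\n"):
--         if state == EXPECT_OPEN:
--             if ln.rstrip() != _FRONTMATTER_DELIMITER:
--                 return "", text
--             state = IN_FM
--         elif state == IN_FM:
--             if ln.rstrip() == _FRONTMATTER_DELIMITER:
--                 state = IN_BODY
--             else:
--                 fm_lines.append(ln)
--         else:
--             body_lines.append(ln)
--     if state != IN_BODY:
--         return "", text
--     return "\n".join(fm_lines), "\n".join(body_lines).strip()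
-- ===== Notes on version B (the rewrite author's own statement) =====
-- stated objective: alternative
-- what changed: Replaces A's index-based scan (check lines[0], then enumerate and on the first closing delimiter slice lines[1:i] and lines[i+1:]) by a single-pass three-state automaton that streams over the lines accumulating frontmatter and body lines directly, with no indices or slicing.
import Mathlib
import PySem

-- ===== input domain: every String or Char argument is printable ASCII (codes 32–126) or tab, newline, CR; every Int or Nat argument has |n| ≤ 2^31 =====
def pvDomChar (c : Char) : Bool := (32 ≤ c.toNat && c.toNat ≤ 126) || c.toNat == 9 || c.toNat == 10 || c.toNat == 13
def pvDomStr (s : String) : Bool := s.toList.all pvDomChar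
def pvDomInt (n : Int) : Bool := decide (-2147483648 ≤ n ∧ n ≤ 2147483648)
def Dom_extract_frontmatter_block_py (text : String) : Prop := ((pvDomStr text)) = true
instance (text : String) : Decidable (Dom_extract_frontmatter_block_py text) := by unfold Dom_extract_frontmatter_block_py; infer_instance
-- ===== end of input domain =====

-- B replaces A's index-based scan-and-slice by a single-pass three-state automaton
-- accumulating frontmatter and body lines directly (objective: alternative decomposition).

-- ===== PORT A =====
-- A's for-loop over enumerate(lines[1:], start=1): first delimiter hit returns the slices
def pvALoop (lines : List String) (text : String) : List (Int × String) → String × String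
  | [] => ("", text)
  | (i, line) :: rest =>
    if PySem.Str.rstrip line == "---" then
      (PySem.Str.join "\n" (PySem.List.slice lines (some 1) (some i)),
       PySem.Str.strip (PySem.Str.join "\n" (PySem.List.slice lines (some (i + 1)) none)))
    else pvALoop lines text rest

def extract_frontmatter_block_py (text : String) : String × String :=
  let lines := (PySem.Str.split? text "\n").getD []   -- sep "\n" ≠ "", so split? is always `some`
  if PySem.Str.rstrip (PySem.List.pyGetD lines 0 "") != "---" then ("", text)
  else pvALoop lines text (PySem.List.enumerate (PySem.List.slice lines (some 1) none) 1)

-- ===== PORT B =====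
-- B's for-loop: state 0 = expect opening, 1 = inside frontmatter, 2 = in body;
-- `none` models B's early `return "", text` / missing closing delimiter
def pvBLoop : List String → Nat → List String → List String → Option (List String × List String)
  | [], st, fm, body => if st == 2 then some (fm, body) else none
  | ln :: rest, st, fm, body =>
    if st == 0 then
      if PySem.Str.rstrip ln != "---" then none
      else pvBLoop rest 1 fm body
    else if st == 1 then
      if PySem.Str.rstrip ln == "---" then pvBLoop rest 2 fm body
      else pvBLoop rest 1 (fm ++ [ln]) body
    else pvBLoop rest 2 fm (body ++ [ln])

def extract_frontmatter_block_py_alt (text : String) : String × String :=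
  let lines := (PySem.Str.split? text "\n").getD []   -- sep "\n" ≠ "", so split? is always `some`
  match pvBLoop lines 0 [] [] with
  | none => ("", text)
  | some (fm, body) => (PySem.Str.join "\n" fm, PySem.Str.strip (PySem.Str.join "\n" body))

-- ===== PRECONDITION & SPEC =====
def Spec_extract_frontmatter_block_py (text : String) (out : String × String) : Prop := out = extract_frontmatter_block_py_alt text
instance (text : String) (out : String × String) : Decidable (Spec_extract_frontmatter_block_py text out) := by unfold Spec_extract_frontmatter_block_py; infer_instance

-- ===== CLAIM (what is proved, stated in full; the proofs are below) =====
def Claim_equal_extract_frontmatter_block_py : Prop := ∀ (text : String), Dom_extract_frontmatter_block_py text → Spec_extract_frontmatter_block_py text (extract_frontmatter_block_py text)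

-- ===== LEMMAS AND PROOFS =====

-- common specification: split a line list at its first delimiter line
def pvSplit : List String → Option (List String × List String)
  | [] => none
  | a :: rest =>
    if PySem.Str.rstrip a == "---" then some ([], rest)
    else (pvSplit rest).map (fun pq => (a :: pq.1, pq.2))

theorem pvBLoop_state2 (l fm body : List String) :
    pvBLoop l 2 fm body = some (fm, body ++ l) := by
  induction l generalizing body with
  | nil => simp [pvBLoop]
  | cons a rest ih => simp [pvBLoop, ih]

theorem pvBLoop_state1 (l : List String) : ∀ fm : List String,
    pvBLoop l 1 fm [] = (pvSplit l).map (fun pq => (fm ++ pq.1, pq.2)) := by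
  induction l with
  | nil => intro fm; rfl
  | cons a rest ih =>
    intro fm
    by_cases h : (PySem.Str.rstrip a == "---") = true
    · simp [pvBLoop, pvSplit, h, pvBLoop_state2]
    · simp only [pvBLoop, pvSplit, h]
      rw [ih (fm ++ [a])]
      cases pvSplit rest <;> simp

theorem pvSplit_shape (l : List String) : ∀ p q : List String,
    pvSplit l = some (p, q) → l.take p.length = p ∧ l.drop (p.length + 1) = q := by
  induction l with
  | nil => intro p q h; simp [pvSplit] at h
  | cons a rest ih =>
    intro p q h
    by_cases hd : (PySem.Str.rstrip a == "---") = true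
    · simp [pvSplit, hd] at h
      obtain ⟨rfl, rfl⟩ := h
      simp
    · rw [pvSplit, if_neg hd] at h
      cases hsp : pvSplit rest with
      | none => rw [hsp] at h; simp at h
      | some pq =>
        obtain ⟨p', q'⟩ := pq
        rw [hsp] at h
        simp only [Option.map_some, Option.some.injEq, Prod.mk.injEq] at h
        obtain ⟨hp, hq⟩ := h
        obtain ⟨h1, h2⟩ := ih p' q' hsp
        subst hp hq
        simp [h1, h2]

theorem pvALoop_eq_split (lines : List String) (text : String) (t : List String) :
    ∀ n : Nat, pvALoop lines text (PySem.List.enumerate t (n : Int)) =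
      match pvSplit t with
      | none => ("", text)
      | some pq =>
        (PySem.Str.join "\n" (PySem.List.slice lines (some 1) (some ((n : Int) + pq.1.length))),
         PySem.Str.strip (PySem.Str.join "\n"
           (PySem.List.slice lines (some ((n : Int) + pq.1.length + 1)) none))) := by
  induction t with
  | nil => intro n; rfl
  | cons a rest ih =>
    intro n
    rw [PySem.List.enumerate_cons]
    by_cases h : (PySem.Str.rstrip a == "---") = true
    · simp [pvALoop, pvSplit, h]
    · have hcast : ((n : Int) + 1) = ((n + 1 : Nat) : Int) := by push_cast; ring
      rw [pvALoop, if_neg h, hcast, ih (n + 1)]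
      simp only [pvSplit, h]
      cases hsp : pvSplit rest with
      | none => rfl
      | some pq =>
        simp only [Option.map_some]
        have e1 : ((n + 1 : Nat) : Int) + pq.1.length = (n : Int) + ((a :: pq.1).length : Int) := by
          simp; ring
        rw [e1]
        simp

-- ===== VERDICT (by name: the statement is the Claim_ definition above) =====
theorem extract_frontmatter_block_py_spec : Claim_equal_extract_frontmatter_block_py := by
  intro text _
  unfold Spec_extract_frontmatter_block_py extract_frontmatter_block_py extract_frontmatter_block_py_alt
  cases hl : (PySem.Str.split? text "\n").getD [] with
  | nil => rfl
  | cons l0 t =>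
    simp only
    have hget : PySem.List.pyGetD (l0 :: t) 0 "" = l0 := by
      simp [PySem.List.pyGetD, PySem.List.pyGet?, PySem.List.pyIdx?]
    have htail : PySem.List.slice (l0 :: t) (some 1) none = t := by
      simpa using PySem.List.slice_from_natCast (l0 :: t) 1
    rw [hget, htail]
    by_cases h : (PySem.Str.rstrip l0 == "---") = true
    · have h' : PySem.Str.rstrip l0 = "---" := by simpa using h
      have hB : pvBLoop (l0 :: t) 0 [] [] = pvBLoop t 1 [] [] := by
        simp [pvBLoop, h']
      rw [if_neg (by simp [bne, h]), hB, pvBLoop_state1 t []]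
      have hA := pvALoop_eq_split (l0 :: t) text t 1
      rw [show ((1 : Nat) : Int) = (1 : Int) by norm_num] at hA
      rw [hA]
      cases hsp : pvSplit t with
      | none => rfl
      | some pq =>
        obtain ⟨p, q⟩ := pq
        obtain ⟨hp, hq⟩ := pvSplit_shape t p q hsp
        have s1 : PySem.List.slice (l0 :: t) (some 1) (some ((1 : Int) + p.length)) = p := by
          have := PySem.List.slice_natCast_add (l0 :: t) 1 p.length
          rw [show ((1 : Nat) : Int) + (p.length : Int) = (1 : Int) + p.length by push_cast; ring] at this
          simpa [hp] using this
        have s2 : PySem.List.slice (l0 :: t) (some ((1 : Int) + p.length + 1)) none = q := by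
          have := PySem.List.slice_from_natCast (l0 :: t) (p.length + 2)
          rw [show ((p.length + 2 : Nat) : Int) = (1 : Int) + p.length + 1 by push_cast; ring] at this
          rw [this, List.drop_succ_cons, ← hq]
        simp only [Option.map_some, List.nil_append]
        rw [s1, s2]
    · have h' : ¬ PySem.Str.rstrip l0 = "---" := by simpa using h
      have hB : pvBLoop (l0 :: t) 0 [] [] = none := by
        simp [pvBLoop, h']
      rw [if_pos (by simp [bne, h]), hB]
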